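-- pv_equiv track=rewrite | github.com/JosefUtbult/Scraper2 | Scraper-master/Parser.py | parse_illeagal
-- ===== SOURCE A (Python) =====
-- illegalText = ["<", ">", "=", "!DOCTYPE", "<script>", "</script>", "/", u"\u005C", "(", ")", "&", "#", "\"", "\'", "[",
--                "]", ",", ".", "-", ";", ":", "\n", "|", "~", "px", "em", "+", "{", "}"]
--
-- def parse_illeagal(instance):
--     if instance == "":
--         return False
--
--     elif instance.isdigit():
--         return False
--
--     for illeagal in illegalText:
--
--         if instance.find(illeagal) != -1:
--             return False
--
--     return True
-- ===== SOURCE B (Python) =====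
-- _ILLEGAL_CHARS = set('<>=/\\()&#"\'[],.-;:\n|~+{}')
-- _ILLEGAL_WORDS = ("!DOCTYPE", "px", "em")
--
-- def parse_illeagal(instance):
--     if instance == "" or instance.isdigit():
--         return False
--     if any(c in _ILLEGAL_CHARS for c in instance):
--         return False
--     return all(w not in instance for w in _ILLEGAL_WORDS)
-- ===== Notes on version B (the rewrite author's own statement) =====
-- stated objective: alternative
-- what changed: A scans the string once per pattern (29 find calls); B keeps the two guards and makes one pass over the characters against a 24-character illegal set plus three multi-character word checks, the two script-tag patterns being subsumed by the single illegal angle-bracket character.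
import Mathlib
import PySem

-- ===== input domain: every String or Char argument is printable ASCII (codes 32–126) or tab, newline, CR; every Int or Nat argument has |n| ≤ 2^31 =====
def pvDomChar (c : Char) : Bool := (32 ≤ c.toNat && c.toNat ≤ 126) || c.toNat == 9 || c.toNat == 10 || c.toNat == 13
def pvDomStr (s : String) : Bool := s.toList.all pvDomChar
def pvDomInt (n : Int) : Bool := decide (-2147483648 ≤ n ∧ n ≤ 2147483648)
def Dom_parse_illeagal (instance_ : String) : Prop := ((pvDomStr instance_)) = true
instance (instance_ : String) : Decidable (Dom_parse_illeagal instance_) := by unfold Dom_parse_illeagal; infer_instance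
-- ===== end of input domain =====

-- B replaces A's 29 separate substring scans by one character-set pass plus three word
-- checks (the two script-tag patterns are subsumed by a single illegal character); objective: alternative.

-- ===== PORT A =====
def illegalText : List String :=
  ["<", ">", "=", "!DOCTYPE", "<script>", "</script>", "/", "\\", "(", ")", "&", "#",
   "\"", "'", "[", "]", ",", ".", "-", ";", ":", "\n", "|", "~", "px", "em", "+", "{", "}"]

-- the for-loop of A: the first pattern found returns False, falling through returns True
def parseLoopA (s : String) : List String → Bool
  | [] => true
  | il :: rest => if PySem.Str.find s il != -1 then false else parseLoopA s rest

def parse_illeagal (instance_ : String) : Bool :=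
  if instance_ == "" then false
  else if PySem.Str.strIsdigit instance_ then false
  else parseLoopA instance_ illegalText

-- ===== PORT B =====
-- set('<>=/\\()&#"\'[],.-;:\n|~+{}') : the distinct characters, a literal char list
def illegalChars : List Char :=
  ['<', '>', '=', '/', '\\', '(', ')', '&', '#', '"', '\'', '[', ']', ',', '.', '-', ';', ':', '\n', '|', '~', '+', '{', '}']
def illegalWords : List String := ["!DOCTYPE", "px", "em"]

def parse_illeagal_alt (instance_ : String) : Bool :=
  if instance_ == "" || PySem.Str.strIsdigit instance_ then false
  else if instance_.toList.any (fun c => illegalChars.contains c) then false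
  else illegalWords.all (fun w => !PySem.Str.isIn w instance_)

-- ===== PRECONDITION & SPEC =====
def Spec_parse_illeagal (instance_ : String) (out : Bool) : Prop := out = parse_illeagal_alt instance_
instance (instance_ : String) (out : Bool) : Decidable (Spec_parse_illeagal instance_ out) := by unfold Spec_parse_illeagal; infer_instance

-- ===== CLAIM (what is proved, stated in full; the proofs are below) =====
def Claim_equal_parse_illeagal : Prop := ∀ (instance_ : String), Dom_parse_illeagal instance_ → Spec_parse_illeagal instance_ (parse_illeagal instance_)

-- ===== LEMMAS AND PROOFS =====

-- the single-character patterns of illegalText, in illegalChars order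
def singles : List String :=
  ["<", ">", "=", "/", "\\", "(", ")", "&", "#", "\"", "'", "[", "]", ",", ".", "-", ";", ":", "\n", "|", "~", "+", "{", "}"]

theorem singles_toList : singles.map String.toList = illegalChars.map (fun c => [c]) := by rfl
theorem singles_mem : ∀ p ∈ singles, p ∈ illegalText := by decide
theorem words_sub : ∀ w ∈ illegalWords, w ∈ illegalText := by decide
theorem text_cases : ∀ p ∈ illegalText,
    p ∈ singles ∨ p ∈ illegalWords ∨ p = "<script>" ∨ p = "</script>" := by decide

theorem loopA_eq_forall (s : String) (l : List String) :
    parseLoopA s l = true ↔ ∀ p ∈ l, ¬ (p.toList <:+: s.toList) := by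
  induction l with
  | nil => simp [parseLoopA]
  | cons a t ih =>
    simp [parseLoopA, ih, bne_iff_ne, PySem.Chars.find_eq_neg_one_iff]

theorem loopA_iff (s : String) :
    parseLoopA s illegalText = true ↔
      ((∀ x ∈ illegalChars, x ∉ s.toList) ∧ ∀ w ∈ illegalWords, ¬ (w.toList <:+: s.toList)) := by
  have hsc : ("<script>".toList <:+: s.toList) → '<' ∈ s.toList := fun h => h.subset (by decide)
  have hsc2 : ("</script>".toList <:+: s.toList) → '<' ∈ s.toList := fun h => h.subset (by decide)
  rw [loopA_eq_forall]
  constructor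
  · intro h
    refine ⟨fun x hx hmem => ?_, fun w hw => h w (words_sub w hw)⟩
    have hx' : [x] ∈ illegalChars.map (fun c => [c]) := List.mem_map_of_mem hx
    rw [← singles_toList] at hx'
    obtain ⟨p, hp, hpe⟩ := List.mem_map.mp hx'
    exact h p (singles_mem p hp) (hpe ▸ (List.singleton_infix_iff x s.toList).mpr hmem)
  · rintro ⟨hc, hw⟩ p hp hinf
    rcases text_cases p hp with hps | hpw | rfl | rfl
    · have hp' : p.toList ∈ singles.map String.toList := List.mem_map_of_mem hps
      rw [singles_toList] at hp'
      obtain ⟨x, hx, hxe⟩ := List.mem_map.mp hp'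
      exact hc x hx ((List.singleton_infix_iff x s.toList).mp (hxe ▸ hinf))
    · exact hw p hpw hinf
    · exact hc '<' (by decide) (hsc hinf)
    · exact hc '<' (by decide) (hsc2 hinf)

-- ===== VERDICT (by name: the statement is the Claim_ definition above) =====
theorem parse_illeagal_spec : Claim_equal_parse_illeagal := by
  intro s _
  unfold Spec_parse_illeagal parse_illeagal parse_illeagal_alt
  by_cases h0 : s == ""
  · simp [h0]
  · by_cases hd : PySem.Str.strIsdigit s
    · rw [PySem.Str.strIsdigit_eq] at hd
      simp [h0, hd]
    · simp only [h0, hd, Bool.or_self, Bool.false_eq_true, if_false]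
      by_cases hany : s.toList.any (fun c => illegalChars.contains c)
      · obtain ⟨c, hcs, hcc⟩ := List.any_eq_true.mp hany
        simp only [hany, if_true]
        rw [Bool.eq_false_iff, Ne, loopA_eq_forall]
        intro h
        have hx' : [c] ∈ illegalChars.map (fun x => [x]) :=
          List.mem_map_of_mem (by simpa using hcc)
        rw [← singles_toList] at hx'
        obtain ⟨p, hp, hpe⟩ := List.mem_map.mp hx'
        exact h p (singles_mem p hp) (hpe ▸ (List.singleton_infix_iff c s.toList).mpr hcs)
      · simp only [hany, Bool.false_eq_true, if_false]
        rw [Bool.eq_iff_iff, loopA_iff]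
        simp only [List.all_eq_true, Bool.not_eq_true', PySem.Str.isIn_eq,
          PySem.Chars.isIn_eq_false_iff]
        constructor
        · rintro ⟨_, hw⟩ w hw'
          exact hw w hw'
        · intro hw
          refine ⟨fun x hx hmem => ?_, fun w hw' => hw w hw'⟩
          exact (List.any_eq_true.not.mp hany) ⟨x, hmem, by simpa using hx⟩
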